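-- pv_equiv track=rewrite | github.com/ariannamethod/SUPPERTIME | utils/assistants_chapter_loader.py | extract_chapter_title
-- ===== SOURCE A (Python) =====
-- def extract_chapter_title(content):
--     """Extract a meaningful chapter title from Markdown content."""
--     lines = content.splitlines()
--     # Prefer a header containing 'chapter' or 'глава'
--     for line in lines:
--         stripped = line.strip()
--         if stripped.startswith("#"):
--             header = stripped.lstrip("#").strip()
--             lower = header.lower()
--             if "chapter" in lower or "\u0433\u043b\u0430\u0432" in lower:
--                 return header
--     # Fallback to first header line
--     for line in lines:
--         stripped = line.strip()
--         if stripped.startswith("#"):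
--             return stripped.lstrip("#").strip()
--     # Ultimate fallback to first non-empty line
--     for line in lines:
--         stripped = line.strip()
--         if stripped:
--             return stripped
--     return "Untitled"
-- ===== SOURCE B (Python) =====
-- def extract_chapter_title(content):
--     """Extract a meaningful chapter title from Markdown content (single pass)."""
--     first_header = None
--     first_nonempty = None
--     for line in content.splitlines():
--         stripped = line.strip()
--         if stripped.startswith("#"):
--             header = stripped.lstrip("#").strip()
--             low = header.lower()
--             if "chapter" in low or "\u0433\u043b\u0430\u0432" in low:
--                 return header
--             if first_header is None:
--                 first_header = header
--         elif stripped and first_nonempty is None: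
--             first_nonempty = stripped
--     if first_header is not None:
--         return first_header
--     if first_nonempty is not None:
--         return first_nonempty
--     return "Untitled"
-- ===== Notes on version B (the rewrite author's own statement) =====
-- stated objective: alternative
-- what changed: Replaces A's three sequential scans over the lines with a single pass that returns a chapter-marked header immediately and otherwise maintains the first header and first non-empty line as optional candidates.
import Mathlib
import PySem

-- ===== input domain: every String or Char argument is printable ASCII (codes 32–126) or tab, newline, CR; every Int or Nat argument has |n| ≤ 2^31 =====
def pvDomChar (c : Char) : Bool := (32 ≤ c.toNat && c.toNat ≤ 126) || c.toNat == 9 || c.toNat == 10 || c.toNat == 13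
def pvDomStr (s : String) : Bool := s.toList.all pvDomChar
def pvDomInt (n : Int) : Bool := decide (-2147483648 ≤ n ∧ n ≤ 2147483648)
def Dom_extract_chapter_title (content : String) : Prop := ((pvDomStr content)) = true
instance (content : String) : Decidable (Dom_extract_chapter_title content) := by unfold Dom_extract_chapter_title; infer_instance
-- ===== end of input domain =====

-- B makes one pass over the lines with two optional candidate slots instead of A's three sequential scans.

-- ===== PORT A =====
-- stripped.lstrip("#") : drop the leading '#' characters (exact: lstrip with a one-character set)
def pvLstripHash (s : String) : String := String.ofList (s.toList.dropWhile (· == '#'))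

-- header text of a stripped header line: stripped.lstrip("#").strip()
def pvHeaderOf (stripped : String) : String := PySem.Str.strip (pvLstripHash stripped)

-- is the header a 'chapter' header: "chapter" in lower or "глав" in lower
def pvIsChapter (header : String) : Bool :=
  PySem.Str.isIn "chapter" (PySem.Str.lower header) || PySem.Str.isIn "глав" (PySem.Str.lower header)

-- A's first loop: first chapter-marked header
def aLoop1 : List String → Option String
  | [] => none
  | line :: rest =>
    let stripped := PySem.Str.strip line
    if PySem.Str.startswith stripped "#" then
      let header := pvHeaderOf stripped
      if pvIsChapter header then some header else aLoop1 rest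
    else aLoop1 rest

-- A's second loop: first header of any kind
def aLoop2 : List String → Option String
  | [] => none
  | line :: rest =>
    let stripped := PySem.Str.strip line
    if PySem.Str.startswith stripped "#" then some (pvHeaderOf stripped) else aLoop2 rest

-- A's third loop: first non-empty stripped line
def aLoop3 : List String → Option String
  | [] => none
  | line :: rest =>
    let stripped := PySem.Str.strip line
    if stripped ≠ "" then some stripped else aLoop3 rest

def extract_chapter_title (content : String) : String :=
  let lines := PySem.Str.splitlines content
  match aLoop1 lines with
  | some h => h
  | none =>
    match aLoop2 lines with
    | some h => h
    | none =>
      match aLoop3 lines with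
      | some s => s
      | none => "Untitled"

-- ===== PORT B =====
-- B's single pass: early return on a chapter header, otherwise carry the first header / first non-empty line
def bLoop : List String → Option String → Option String → String
  | [], firstHeader, firstNonempty =>
    match firstHeader with
    | some h => h
    | none =>
      match firstNonempty with
      | some s => s
      | none => "Untitled"
  | line :: rest, firstHeader, firstNonempty =>
    let stripped := PySem.Str.strip line
    if PySem.Str.startswith stripped "#" then
      let header := pvHeaderOf stripped
      if pvIsChapter header then header
      else bLoop rest (if firstHeader.isNone then some header else firstHeader) firstNonempty
    else if stripped ≠ "" && firstNonempty.isNone then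
      bLoop rest firstHeader (some stripped)
    else
      bLoop rest firstHeader firstNonempty

def extract_chapter_title_alt (content : String) : String :=
  bLoop (PySem.Str.splitlines content) none none

-- ===== PRECONDITION & SPEC =====
def Spec_extract_chapter_title (content : String) (out : String) : Prop := out = extract_chapter_title_alt content
instance (content : String) (out : String) : Decidable (Spec_extract_chapter_title content out) := by unfold Spec_extract_chapter_title; infer_instance

-- ===== CLAIM (what is proved, stated in full; the proofs are below) =====
def Claim_equal_extract_chapter_title : Prop := ∀ (content : String), Dom_extract_chapter_title content → Spec_extract_chapter_title content (extract_chapter_title content)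

-- ===== LEMMAS AND PROOFS =====

-- single-pass invariant: bLoop with carried candidates equals A's three-scan chain seeded with them
theorem bLoop_eq_chain (lines : List String) :
    ∀ (fh fne : Option String),
      bLoop lines fh fne =
        match aLoop1 lines with
        | some h => h
        | none =>
          match fh.or (aLoop2 lines) with
          | some h => h
          | none =>
            match fne.or (aLoop3 lines) with
            | some s => s
            | none => "Untitled" := by
  induction lines with
  | nil =>
    intro fh fne
    simp [bLoop, aLoop1, aLoop2, aLoop3]
  | cons line rest ih =>
    intro fh fne
    simp only [bLoop, aLoop1, aLoop2, aLoop3]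
    by_cases hS : PySem.Str.startswith (PySem.Str.strip line) "#" = true
    · simp only [hS, if_true]
      by_cases hC : pvIsChapter (pvHeaderOf (PySem.Str.strip line)) = true
      · simp [hC]
      · rw [if_neg hC, if_neg hC, ih]
        cases fh <;> simp [Option.or]
    · simp only [hS, if_false, Bool.false_eq_true]
      by_cases hE : PySem.Str.strip line ≠ ""
      · cases fne with
        | none =>
          rw [if_pos (by simp [hE]), if_pos hE, ih]
          simp [Option.or]
        | some s =>
          rw [if_neg (by simp), if_pos hE, ih]
          simp [Option.or]
      · simp only [ne_eq, not_not] at hE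
        simp [hE]
        rw [ih]

-- ===== VERDICT (by name: the statement is the Claim_ definition above) =====
theorem extract_chapter_title_spec : Claim_equal_extract_chapter_title := by
  intro content _
  unfold Spec_extract_chapter_title extract_chapter_title extract_chapter_title_alt
  rw [bLoop_eq_chain]
  simp [Option.or]
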